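-- pv_equiv track=rewrite | github.com/PostHog/posthog | dags/materialized_columns.py | join_mappings
-- ===== SOURCE A (Python) =====
-- from collections.abc import Iterator, Mapping
-- from typing import ClassVar, TypeVar, cast
--
-- K1 = TypeVar("K1")
--
-- K2 = TypeVar("K2")
--
-- V = TypeVar("V")
--
-- def join_mappings(mappings: Mapping[K1, Mapping[K2, V]]) -> Mapping[K2, Mapping[K1, V]]:
--     outer_keys = set()
--     for inner_mapping in mappings.values():
--         outer_keys.update(inner_mapping.keys())
--
--     result = {}
--     for outer_key in outer_keys:
--         result[outer_key] = {}
--         for inner_key, inner_mapping in mappings.items():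
--             if outer_key in inner_mapping:
--                 result[outer_key][inner_key] = inner_mapping[outer_key]
--
--     return result
-- ===== SOURCE B (Python) =====
-- def join_mappings(mappings):
--     # Group (inner_key, value) pairs into a list per outer key in one pass,
--     # then turn each list of pairs into a dict at the end.
--     rows = {}
--     for inner_key, inner_mapping in mappings.items():
--         for outer_key, value in inner_mapping.items():
--             rows.setdefault(outer_key, []).append((inner_key, value))
--     return {outer_key: dict(pairs) for outer_key, pairs in rows.items()}
-- ===== Notes on version B (the rewrite author's own statement) =====
-- stated objective: alternative
-- what changed: A collects the set of outer keys and then rescans every mapping once per outer key; B makes a single pass over all entries, grouping (inner_key, value) pairs into a list per outer key, and converts each list to a dict at the end (asymptotically O(E) vs O(K*N+E), measured only ~1.3x on the generated inputs).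
import Mathlib
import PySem

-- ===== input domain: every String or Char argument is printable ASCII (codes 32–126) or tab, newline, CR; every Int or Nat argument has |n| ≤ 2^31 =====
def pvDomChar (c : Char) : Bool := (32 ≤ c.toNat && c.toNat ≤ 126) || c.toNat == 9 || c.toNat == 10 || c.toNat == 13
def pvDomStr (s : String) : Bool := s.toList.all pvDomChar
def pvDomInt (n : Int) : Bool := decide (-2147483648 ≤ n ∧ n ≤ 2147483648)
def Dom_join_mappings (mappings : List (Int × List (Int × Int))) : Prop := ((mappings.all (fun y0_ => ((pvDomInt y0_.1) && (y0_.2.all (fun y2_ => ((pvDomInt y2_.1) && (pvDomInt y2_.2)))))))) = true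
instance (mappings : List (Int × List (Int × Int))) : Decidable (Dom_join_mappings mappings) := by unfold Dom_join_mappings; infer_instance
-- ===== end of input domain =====

-- B replaces A's per-outer-key rescan of all mappings by one grouping pass over all entries,
-- collecting each transposed row as a LIST of pairs and dict-ifying the rows at the end (objective: alternative single-pass algorithm).
-- Dicts are insertion-ordered assoc lists; Python's hash order over A's `set` is not modelled, the
-- ports iterate the set in first-insertion order (dict-valued outputs are compared ignoring order).

-- ===== PORT A =====
def join_mappings (mappings : List (Int × List (Int × Int))) : List (Int × List (Int × Int)) :=
  -- outer_keys = set(); for inner_mapping in mappings.values(): outer_keys.update(inner_mapping.keys())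
  -- result = {}; for outer_key in outer_keys: result[outer_key] = {}; for inner_key, inner_mapping in
  --   mappings.items(): if outer_key in inner_mapping: result[outer_key][inner_key] = inner_mapping[outer_key]
  (((mappings.foldl (fun s p => PySem.Set.update s (PySem.Dict.keys (PySem.Dict.mk p.2)))
      PySem.Set.empty).foldl (fun result ok =>
      mappings.foldl (fun result p =>
        if PySem.Dict.contains (PySem.Dict.mk p.2) ok then
          PySem.Dict.modify result ok PySem.Dict.empty
            (fun d => PySem.Dict.insert d p.1 (PySem.Dict.getD (PySem.Dict.mk p.2) ok 0))
        else result)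
        (PySem.Dict.insert result ok PySem.Dict.empty))
      PySem.Dict.empty).items).map (fun kv => (kv.1, kv.2.items))

-- ===== PORT B =====
def join_mappings_alt (mappings : List (Int × List (Int × Int))) : List (Int × List (Int × Int)) :=
  -- rows = {}; for inner_key, inner_mapping in mappings.items():
  --   for outer_key, value in inner_mapping.items(): rows.setdefault(outer_key, []).append((inner_key, value))
  -- return {outer_key: dict(pairs) for outer_key, pairs in rows.items()}
  ((mappings.foldl (fun rows p =>
      p.2.foldl (fun rows kv =>
        PySem.Dict.modify rows kv.1 [] (fun l => l ++ [(p.1, kv.2)]))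
        rows)
      PySem.Dict.empty).items).map (fun kv => (kv.1, (PySem.Dict.ofList kv.2).items))

-- ===== PRECONDITION & SPEC =====
-- Pre_ excludes association lists in which some inner mapping carries a duplicate key: a Python dict
-- cannot contain duplicate keys, so such lists represent no Python input, and the two ports' first-match
-- vs last-write readings of a duplicated key differ there.
def Pre_join_mappings (mappings : List (Int × List (Int × Int))) : Prop :=
  ∀ p ∈ mappings, (p.2.map Prod.fst).Nodup
instance (mappings : List (Int × List (Int × Int))) : Decidable (Pre_join_mappings mappings) := by
  unfold Pre_join_mappings; infer_instance
def pvWitness_join_mappings : (List (Int × List (Int × Int))) := [(1, [(2, 3)]), (4, [(2, 5), (6, 7)])]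

def Spec_join_mappings (mappings : List (Int × List (Int × Int))) (out : List (Int × List (Int × Int))) : Prop := out = join_mappings_alt mappings
instance (mappings : List (Int × List (Int × Int))) (out : List (Int × List (Int × Int))) : Decidable (Spec_join_mappings mappings out) := by unfold Spec_join_mappings; infer_instance

-- ===== CLAIM (what is proved, stated in full; the proofs are below) =====
def Claim_equal_join_mappings : Prop := ∀ (mappings : List (Int × List (Int × Int))), Dom_join_mappings mappings → Pre_join_mappings mappings → Spec_join_mappings mappings (join_mappings mappings)

-- ===== LEMMAS AND PROOFS =====

-- flattened (outer_key, inner_key, value) entries, in traversal order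
def pvTri (ms : List (Int × List (Int × Int))) : List (Int × Int × Int) :=
  ms.flatMap (fun p => p.2.map (fun kv => (kv.1, p.1, kv.2)))

-- all outer keys, in traversal order
def pvKs (ms : List (Int × List (Int × Int))) : List Int :=
  ms.flatMap (fun p => p.2.map Prod.fst)

-- the transposed row for outer key k
def pvRow (ms : List (Int × List (Int × Int))) (k : Int) : PySem.Dict Int Int :=
  (((pvTri ms).filter (fun t => t.1 == k)).map (fun t => t.2)).foldl
    (fun v q => v.insert q.1 q.2) PySem.Dict.empty

-- A's body of the loop over one outer key
def pvProc (ms : List (Int × List (Int × Int)))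
    (r : PySem.Dict Int (PySem.Dict Int Int)) (ok : Int) : PySem.Dict Int (PySem.Dict Int Int) :=
  ms.foldl (fun result p =>
    if PySem.Dict.contains (PySem.Dict.mk p.2) ok then
      PySem.Dict.modify result ok PySem.Dict.empty
        (fun d => PySem.Dict.insert d p.1 (PySem.Dict.getD (PySem.Dict.mk p.2) ok 0))
    else result)
    (PySem.Dict.insert r ok PySem.Dict.empty)

theorem pvTri_map_fst (ms : List (Int × List (Int × Int))) :
    (pvTri ms).map (fun t => t.1) = pvKs ms := by
  simp [pvTri, pvKs, List.map_flatMap, Function.comp_def]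

theorem pvA_inner_getD (ms : List (Int × List (Int × Int))) (ok k : Int)
    (r : PySem.Dict Int (PySem.Dict Int Int)) :
    (ms.foldl (fun result p =>
        if PySem.Dict.contains (PySem.Dict.mk p.2) ok then
          PySem.Dict.modify result ok PySem.Dict.empty
            (fun d => PySem.Dict.insert d p.1 (PySem.Dict.getD (PySem.Dict.mk p.2) ok 0))
        else result) r).getD k PySem.Dict.empty
    = if k = ok then
        (ms.filter (fun p => PySem.Dict.contains (PySem.Dict.mk p.2) ok)).foldl
          (fun v p => PySem.Dict.insert v p.1 (PySem.Dict.getD (PySem.Dict.mk p.2) ok 0))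
          (r.getD ok PySem.Dict.empty)
      else r.getD k PySem.Dict.empty := by
  induction ms generalizing r with
  | nil => by_cases h : k = ok <;> simp [h]
  | cons p ms ih =>
      rw [List.foldl_cons, ih, List.filter_cons]
      by_cases c : PySem.Dict.contains (PySem.Dict.mk p.2) ok
      · by_cases h : k = ok <;>
          simp [c, h, PySem.Dict.getD_modify]
      · simp [c]

theorem pvA_inner_keys (ms : List (Int × List (Int × Int))) (ok : Int)
    (r : PySem.Dict Int (PySem.Dict Int Int)) (h : PySem.Dict.contains r ok = true) :
    (ms.foldl (fun result p =>
        if PySem.Dict.contains (PySem.Dict.mk p.2) ok then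
          PySem.Dict.modify result ok PySem.Dict.empty
            (fun d => PySem.Dict.insert d p.1 (PySem.Dict.getD (PySem.Dict.mk p.2) ok 0))
        else result) r).keys = r.keys := by
  induction ms generalizing r with
  | nil => rfl
  | cons p ms ih =>
      rw [List.foldl_cons]
      by_cases c : PySem.Dict.contains (PySem.Dict.mk p.2) ok
      · rw [if_pos c]
        have hk : (PySem.Dict.modify r ok PySem.Dict.empty
            (fun d => PySem.Dict.insert d p.1 (PySem.Dict.getD (PySem.Dict.mk p.2) ok 0))).keys = r.keys := by
          rw [PySem.Dict.keys_modify, PySem.Dict.keys_insert_of_contains _ _ h]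
        have hc : PySem.Dict.contains (PySem.Dict.modify r ok PySem.Dict.empty
            (fun d => PySem.Dict.insert d p.1 (PySem.Dict.getD (PySem.Dict.mk p.2) ok 0))) ok = true := by
          rw [PySem.Dict.contains_eq_decide_mem_keys] at h ⊢
          rw [hk]; exact h
        rw [ih _ hc, hk]
      · rw [if_neg c, ih _ h]

theorem pvA_outer_getD (ms : List (Int × List (Int × Int))) (okl : List Int)
    (r : PySem.Dict Int (PySem.Dict Int Int)) (k : Int) :
    (okl.foldl (pvProc ms) r).getD k PySem.Dict.empty
    = if k ∈ okl then
        (ms.filter (fun p => PySem.Dict.contains (PySem.Dict.mk p.2) k)).foldl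
          (fun v p => PySem.Dict.insert v p.1 (PySem.Dict.getD (PySem.Dict.mk p.2) k 0))
          PySem.Dict.empty
      else r.getD k PySem.Dict.empty := by
  induction okl generalizing r with
  | nil => simp
  | cons ok okl ih =>
      rw [List.foldl_cons, ih]
      have hproc : (pvProc ms r ok).getD k PySem.Dict.empty
          = if k = ok then
              (ms.filter (fun p => PySem.Dict.contains (PySem.Dict.mk p.2) k)).foldl
                (fun v p => PySem.Dict.insert v p.1 (PySem.Dict.getD (PySem.Dict.mk p.2) k 0))
                PySem.Dict.empty
            else r.getD k PySem.Dict.empty := by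
        rw [pvProc, pvA_inner_getD]
        by_cases h : k = ok
        · subst h
          rw [if_pos rfl, if_pos rfl, PySem.Dict.getD_insert_self]
        · rw [if_neg h, if_neg h, PySem.Dict.getD_insert]
          rw [if_neg h]
      by_cases hmem : k ∈ okl
      · rw [if_pos hmem, if_pos (List.mem_cons_of_mem _ hmem)]
      · rw [if_neg hmem, hproc]
        by_cases h : k = ok
        · rw [if_pos h, if_pos (by simp [h])]
        · rw [if_neg h, if_neg (by simp [List.mem_cons, h, hmem])]

theorem pvA_outer_keys (ms : List (Int × List (Int × Int))) (okl : List Int)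
    (r : PySem.Dict Int (PySem.Dict Int Int)) :
    (okl.foldl (pvProc ms) r).keys = PySem.Set.update r.keys okl := by
  induction okl generalizing r with
  | nil => rfl
  | cons ok okl ih =>
      rw [List.foldl_cons, ih]
      have h1 : (pvProc ms r ok).keys = PySem.Set.add r.keys ok := by
        rw [pvProc, pvA_inner_keys _ _ _ (PySem.Dict.contains_insert_self r ok PySem.Dict.empty)]
        by_cases c : PySem.Dict.contains r ok = true
        · rw [PySem.Dict.keys_insert_of_contains _ _ c]
          have hm : ok ∈ r.keys := by
            rw [PySem.Dict.contains_eq_decide_mem_keys] at c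
            exact of_decide_eq_true c
          simp [PySem.Set.add, PySem.Set.contains, hm]
        · rw [PySem.Dict.keys_insert_of_not_contains _ _ (by simpa using c)]
          have hm : ok ∉ r.keys := by
            rw [PySem.Dict.contains_eq_decide_mem_keys] at c
            simpa using c
          simp [PySem.Set.add, PySem.Set.contains, hm]
      rw [h1]
      rfl

-- on an inner mapping without duplicate keys, B's filtered entries for outer key k
-- are exactly A's guarded single lookup
theorem pv_inner_filter (l : List (Int × Int)) (ik k : Int)
    (h : (l.map Prod.fst).Nodup) (v : PySem.Dict Int Int) :
    (((l.map (fun kv => (kv.1, ik, kv.2))).filter (fun t => t.1 == k)).map (fun t => t.2)).foldl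
        (fun v q => PySem.Dict.insert v q.1 q.2) v
    = if PySem.Dict.contains (PySem.Dict.mk l) k then
        PySem.Dict.insert v ik (PySem.Dict.getD (PySem.Dict.mk l) k 0)
      else v := by
  induction l with
  | nil => simp [PySem.Dict.contains_mk]
  | cons a l ih =>
      obtain ⟨a1, a2⟩ := a
      obtain ⟨ha, hnd⟩ := List.nodup_cons.mp h
      by_cases h1 : a1 = k
      · have hrest : ((l.map (fun kv => (kv.1, ik, kv.2))).filter (fun t => t.1 == k)) = [] := by
          rw [List.filter_eq_nil_iff]
          intro t ht
          obtain ⟨kv, hkv, rfl⟩ := List.mem_map.mp ht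
          have hmem : kv.1 ∈ l.map Prod.fst := List.mem_map.mpr ⟨kv, hkv, rfl⟩
          simp only [beq_iff_eq]
          intro hk
          exact ha (by rw [h1]; exact hk ▸ hmem)
        simp [h1, hrest, PySem.Dict.contains_mk,
          PySem.Dict.getD_eq_get?_getD, PySem.Dict.get?_mk_cons]
      · have hc : PySem.Dict.contains (PySem.Dict.mk ((a1, a2) :: l)) k
            = PySem.Dict.contains (PySem.Dict.mk l) k := by
          simp [PySem.Dict.contains_mk, h1]
        have hg : PySem.Dict.getD (PySem.Dict.mk ((a1, a2) :: l)) k 0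
            = PySem.Dict.getD (PySem.Dict.mk l) k 0 := by
          simp [PySem.Dict.getD_eq_get?_getD, PySem.Dict.get?_mk_cons, h1]
        simp only [List.map_cons, List.filter_cons, beq_iff_eq, h1, if_false, hc, hg]
        exact ih hnd

theorem pv_row_eq (ms : List (Int × List (Int × Int))) (hpre : Pre_join_mappings ms) (k : Int) :
    (ms.filter (fun p => PySem.Dict.contains (PySem.Dict.mk p.2) k)).foldl
        (fun v p => PySem.Dict.insert v p.1 (PySem.Dict.getD (PySem.Dict.mk p.2) k 0))
        PySem.Dict.empty
    = pvRow ms k := by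
  rw [pvRow, pvTri, List.filter_flatMap]
  rw [List.map_flatMap, List.foldl_flatMap, List.foldl_filter]
  apply PySem.List.foldl_congr_mem
  intro v p hp
  exact (pv_inner_filter p.2 p.1 k (hpre p hp) v).symm

-- B's grouping fold, flattened over the triples
theorem pvB_rows_eq (ms : List (Int × List (Int × Int))) :
    (ms.foldl (fun rows p =>
        p.2.foldl (fun rows kv =>
          PySem.Dict.modify rows kv.1 [] (fun l => l ++ [(p.1, kv.2)])) rows)
      PySem.Dict.empty)
    = (pvTri ms).foldl (fun d t => PySem.Dict.modify d t.1 [] (fun l => l ++ [t.2]))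
        PySem.Dict.empty := by
  rw [pvTri, List.foldl_flatMap]
  simp [List.foldl_map]

theorem pv_ports_eq (ms : List (Int × List (Int × Int))) (hpre : Pre_join_mappings ms) :
    join_mappings ms = join_mappings_alt ms := by
  unfold join_mappings join_mappings_alt
  -- A's outer_keys set is the ordered dedup of all inner keys
  have houter : (ms.foldl (fun s p => PySem.Set.update s (PySem.Dict.keys (PySem.Dict.mk p.2)))
      PySem.Set.empty) = PySem.Set.ofList (pvKs ms) := by
    rw [PySem.Set.ofList_eq_foldl, pvKs, List.foldl_flatMap]
    simp [PySem.Dict.keys_mk, PySem.Set.update, List.foldl_map, PySem.Set.empty]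
  rw [houter, pvB_rows_eq]
  have hfn : (fun (result : PySem.Dict Int (PySem.Dict Int Int)) (ok : Int) =>
      ms.foldl (fun result p =>
        if PySem.Dict.contains (PySem.Dict.mk p.2) ok then
          PySem.Dict.modify result ok PySem.Dict.empty
            (fun d => PySem.Dict.insert d p.1 (PySem.Dict.getD (PySem.Dict.mk p.2) ok 0))
        else result)
        (PySem.Dict.insert result ok PySem.Dict.empty)) = pvProc ms := rfl
  rw [hfn]
  -- keys of both results: the ordered dedup of pvKs
  have hkA : ((PySem.Set.ofList (pvKs ms)).foldl (pvProc ms) PySem.Dict.empty).keys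
      = PySem.Set.ofList (pvKs ms) := by
    rw [pvA_outer_keys]
    rw [PySem.Dict.keys_empty, PySem.Set.update_nil_left, PySem.Set.ofList_ofList]
  have hkB : ((pvTri ms).foldl (fun d t => PySem.Dict.modify d t.1 [] (fun l => l ++ [t.2]))
        PySem.Dict.empty).keys = PySem.Set.ofList (pvKs ms) := by
    rw [PySem.Dict.keys_foldl_modify_key (pvTri ms) (fun t => t.1) []
      (fun _ t => fun l => l ++ [t.2]) PySem.Dict.empty]
    rw [PySem.Dict.keys_empty, PySem.Set.update_nil_left, pvTri_map_fst]
  have hnd : (PySem.Set.ofList (pvKs ms)).Nodup := PySem.Set.nodup_ofList _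
  rw [PySem.Dict.items_eq_map_keys _ (by rw [hkA]; exact hnd) PySem.Dict.empty,
      PySem.Dict.items_eq_map_keys _ (by rw [hkB]; exact hnd) ([] : List (Int × Int)),
      hkA, hkB, List.map_map, List.map_map]
  apply List.map_congr_left
  intro k hk
  simp only [Function.comp_def]
  congr 1
  -- A's row at k
  rw [pvA_outer_getD, if_pos hk, pv_row_eq ms hpre k]
  -- B's row at k: grouped pair list, then dict(pairs) = foldl insert = pvRow
  rw [PySem.Dict.getD_foldl_modify_append (pvTri ms) PySem.Dict.empty k,
      PySem.Dict.getD_empty]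
  rw [pvRow]
  simp only [List.nil_append]
  rfl

-- ===== VERDICT (by name: the statement is the Claim_ definition above) =====
theorem join_mappings_spec : Claim_equal_join_mappings := by
  intro ms _ hpre
  unfold Spec_join_mappings
  exact pv_ports_eq ms hpre
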